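-- pv_equiv track=rewrite | github.com/sartography/SpiffWorkflow | SpiffWorkflow/traversal.py | same_ending_length
-- ===== SOURCE A (Python) =====
-- def same_ending_length(node):
--     """
--     return the length of the endings of each child that match each other
--     """
--     # go get a modified list of just the ids in each child.
--     endings = [[leaf['id'] for leaf in branch['children']] for branch in node]
--     # the longest identical ending will be equal to the lenght of the
--     # shortest list
--     shortest_list = min([len(x) for x in endings])
--     # walk through the list and determine if they are all the same
--     # for each. If they are not the same, then we back off the snip point
--     snip_point = shortest_list
--     for x in reversed(range(shortest_list)):
--         current_pos = -(x+1)
--         end_ids = [el[current_pos] for el in endings]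
--         if not len(set(end_ids)) <= 1:
--             snip_point = snip_point - 1
--     return snip_point
-- ===== SOURCE B (Python) =====
-- def same_ending_length(node):
--     """
--     return the length of the endings of each child that match each other
--     """
--     # Fold over the branches, maintaining a running "merged suffix":
--     # aligned from the end, each entry keeps the first branch's id at that
--     # position and a flag saying every branch seen so far agrees there.
--     acc = None
--     for branch in node:
--         ids = [leaf['id'] for leaf in branch['children']]
--         if acc is None:
--             acc = [(v, True) for v in ids]
--         else:
--             m = min(len(acc), len(ids))
--             a = acc[len(acc) - m:]
--             b = ids[len(ids) - m:]
--             acc = [(v, ok and v == w) for (v, ok), w in zip(a, b)]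
--     return sum(1 for v, ok in acc if ok)
-- ===== Notes on version B (the rewrite author's own statement) =====
-- stated objective: alternative
-- what changed: Instead of precomputing the minimum length and scanning each trailing column with set(), B folds over the branches once, maintaining a running merged suffix of (id, still-agrees) pairs that it trims and updates against each branch, and finally counts the surviving flags.
import Mathlib
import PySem

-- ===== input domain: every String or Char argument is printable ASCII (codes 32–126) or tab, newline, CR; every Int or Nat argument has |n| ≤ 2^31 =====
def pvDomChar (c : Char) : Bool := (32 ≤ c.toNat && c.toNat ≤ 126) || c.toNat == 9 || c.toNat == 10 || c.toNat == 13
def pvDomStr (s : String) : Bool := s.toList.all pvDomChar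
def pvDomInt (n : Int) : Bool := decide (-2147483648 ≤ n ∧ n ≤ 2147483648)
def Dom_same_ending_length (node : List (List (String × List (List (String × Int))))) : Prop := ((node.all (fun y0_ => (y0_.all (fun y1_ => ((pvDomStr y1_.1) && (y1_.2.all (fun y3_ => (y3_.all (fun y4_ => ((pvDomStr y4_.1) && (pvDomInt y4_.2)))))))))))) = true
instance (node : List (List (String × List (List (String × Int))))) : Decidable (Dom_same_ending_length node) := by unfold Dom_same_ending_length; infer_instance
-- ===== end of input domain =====

-- B replaces A's min-length-then-column-scan-with-set() by a single fold over the branches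
-- maintaining a running merged suffix of (id, still-agrees) flags (objective: alternative).

-- ===== PORT A =====
-- endings = [[leaf['id'] for leaf in branch['children']] for branch in node]  (shared first line of both versions)
def pvEndings (node : List (List (String × List (List (String × Int))))) : List (List Int) :=
  node.map (fun branch =>
    ((PySem.Dict.get? (PySem.Dict.mk branch) "children").getD []).map
      (fun leaf => (PySem.Dict.get? (PySem.Dict.mk leaf) "id").getD 0))

-- shortest_list = min([len(x) for x in endings])  (Pre_ excludes the empty min)
def pvShortest (node : List (List (String × List (List (String × Int))))) : Int :=
  (PySem.List.min? ((pvEndings node).map (fun x => (x.length : Int))) (fun v => v)).getD 0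

def same_ending_length (node : List (List (String × List (List (String × Int))))) : Int :=
  let endings := pvEndings node
  let shortest_list := pvShortest node
  ((PySem.List.pyRange 0 shortest_list 1).reverse).foldl
    (fun snip_point x =>
      if ¬ ((PySem.Set.ofList (endings.map (fun el => PySem.List.pyGetD el (-(x + 1)) 0))).length ≤ 1)
      then snip_point - 1 else snip_point)
    shortest_list

-- ===== PORT B =====
-- merge step: m = min(len(acc), len(ids)); the nonnegative-start slices acc[len(acc)-m:]
-- and ids[len(ids)-m:] are List.drop exactly (start ≥ 0 and ≤ length); zip then update flags
def pvMergeB (acc : List (Int × Bool)) (ids : List Int) : List (Int × Bool) :=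
  let m := min acc.length ids.length
  ((acc.drop (acc.length - m)).zip (ids.drop (ids.length - m))).map
    (fun p => (p.1.1, p.1.2 && (p.1.1 == p.2)))

def same_ending_length_alt (node : List (List (String × List (List (String × Int))))) : Int :=
  let acc := (pvEndings node).foldl
    (fun acc ids =>
      match acc with
      | none => some (ids.map (fun v => (v, true)))
      | some a => some (pvMergeB a ids))
    (none : Option (List (Int × Bool)))
  match acc with
  | none => 0   -- Python B raises (TypeError) on an empty node; outside Pre_
  | some a => ((a.countP (fun p => p.2) : Nat) : Int)

-- ===== PRECONDITION & SPEC =====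
-- Pre_ excludes exactly the inputs where Python A raises: an empty node (min of no branches is a
-- ValueError, and B's accumulator never initialises) and branches/leaves missing the
-- 'children'/'id' key (KeyError).
def Pre_same_ending_length (node : List (List (String × List (List (String × Int))))) : Prop :=
  node ≠ [] ∧ ∀ branch ∈ node,
    (PySem.Dict.mk branch).contains "children" = true ∧
    ∀ leaf ∈ (PySem.Dict.get? (PySem.Dict.mk branch) "children").getD [],
      (PySem.Dict.mk leaf).contains "id" = true
instance (node : List (List (String × List (List (String × Int))))) : Decidable (Pre_same_ending_length node) := by unfold Pre_same_ending_length; infer_instance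

def pvWitness_same_ending_length : (List (List (String × List (List (String × Int))))) :=
  [[("children", [[("id", 1)], [("id", 2)]])], [("children", [[("id", 2)]])]]

def Spec_same_ending_length (node : List (List (String × List (List (String × Int))))) (out : Int) : Prop := out = same_ending_length_alt node
instance (node : List (List (String × List (List (String × Int))))) (out : Int) : Decidable (Spec_same_ending_length node out) := by unfold Spec_same_ending_length; infer_instance

-- ===== CLAIM (what is proved, stated in full; the proofs are below) =====
def Claim_equal_same_ending_length : Prop := ∀ (node : List (List (String × List (List (String × Int))))), Dom_same_ending_length node → Pre_same_ending_length node → Spec_same_ending_length node (same_ending_length node)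

-- ===== LEMMAS AND PROOFS =====

-- running minimum of the branch lengths, as B's fold computes it
def pvMinFold (n : Nat) (es : List (List Int)) : Nat :=
  es.foldl (fun n e => min n e.length) n

lemma minFold_le_init (n : Nat) (es : List (List Int)) : pvMinFold n es ≤ n := by
  induction es generalizing n with
  | nil => exact le_rfl
  | cons e es ih =>
    calc pvMinFold (min n e.length) es ≤ min n e.length := ih _
      _ ≤ n := min_le_left _ _

lemma minFold_le_mem (n : Nat) (es : List (List Int)) (e : List Int) (he : e ∈ es) :
    pvMinFold n es ≤ e.length := by
  induction es generalizing n with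
  | nil => cases he
  | cons e' es ih =>
    rcases List.mem_cons.mp he with rfl | he'
    · calc pvMinFold (min n e.length) es ≤ min n e.length := minFold_le_init _ _
        _ ≤ e.length := min_le_right _ _
    · exact ih _ he'

lemma le_minFold (k n : Nat) (es : List (List Int)) (hn : k ≤ n)
    (h : ∀ e ∈ es, k ≤ e.length) : k ≤ pvMinFold n es := by
  induction es generalizing n with
  | nil => exact hn
  | cons e es ih =>
    exact ih _ (le_min hn (h e (by simp))) (fun e' he' => h e' (by simp [he']))

lemma getD_range_map {α : Type} (f : Nat → α) (n p : Nat) (d : α) (h : p < n) :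
    ((List.range n).map f).getD p d = f p := by
  rw [List.getD, List.getElem?_map, List.getElem?_range h]
  rfl

-- the merge step as a map over the positions of the common trailing window
lemma mergeB_eq (a : List (Int × Bool)) (e : List Int) :
    pvMergeB a e = (List.range (min a.length e.length)).map (fun p =>
      ((a.getD (a.length - min a.length e.length + p) (0, false)).1,
       (a.getD (a.length - min a.length e.length + p) (0, false)).2 &&
         ((a.getD (a.length - min a.length e.length + p) (0, false)).1
           == e.getD (e.length - min a.length e.length + p) 0))) := by
  apply List.ext_getElem
  · simp [pvMergeB]; omega
  · intro i h1 h2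
    have hi : i < min a.length e.length := by
      simp only [pvMergeB, List.length_map, List.length_zip, List.length_drop] at h1
      omega
    have hia : a.length - min a.length e.length + i < a.length := by omega
    have hie : e.length - min a.length e.length + i < e.length := by omega
    simp [pvMergeB, List.getD,
      List.getElem?_eq_getElem hia, List.getElem?_eq_getElem hie]

-- B's fold over the remaining branches, characterised position by position
lemma foldl_merge_spec (es : List (List Int)) (a : List (Int × Bool)) :
    es.foldl pvMergeB a = (List.range (pvMinFold a.length es)).map (fun p =>
      ((a.getD (a.length - pvMinFold a.length es + p) (0, false)).1,
       (a.getD (a.length - pvMinFold a.length es + p) (0, false)).2 &&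
         es.all (fun e =>
           (a.getD (a.length - pvMinFold a.length es + p) (0, false)).1
             == e.getD (e.length - pvMinFold a.length es + p) 0))) := by
  induction es generalizing a with
  | nil =>
    simp only [List.foldl_nil, pvMinFold, List.all_nil, Bool.and_true,
      Nat.sub_self, Nat.zero_add]
    apply List.ext_getElem
    · simp
    · intro i h1 h2
      have hi : i < a.length := h1
      simp [List.getD, List.getElem?_eq_getElem hi]
  | cons e es ih =>
    have hlen' : (pvMergeB a e).length = min a.length e.length := by
      simp [mergeB_eq]
    rw [List.foldl_cons, ih]
    have hm1a : min a.length e.length ≤ a.length := min_le_left _ _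
    have hm1e : min a.length e.length ≤ e.length := min_le_right _ _
    have hmm1 : pvMinFold (min a.length e.length) es ≤ min a.length e.length :=
      minFold_le_init _ _
    have hmf : pvMinFold a.length (e :: es) = pvMinFold (min a.length e.length) es := rfl
    rw [hmf, hlen']
    set m1 := min a.length e.length with hm1
    set m := pvMinFold m1 es with hmdef
    apply List.map_congr_left
    intro p hp
    have hpm : p < m := List.mem_range.mp hp
    have hidx : m1 - m + p < m1 := by omega
    rw [mergeB_eq, getD_range_map _ _ _ _ hidx]
    have h1 : a.length - m1 + (m1 - m + p) = a.length - m + p := by omega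
    have h2 : e.length - m1 + (m1 - m + p) = e.length - m + p := by omega
    simp only [← hm1, h1, h2, List.all_cons]
    rw [Bool.and_assoc]

-- the first branch wrapped as the initial accumulator
lemma getD_map_true (e : List Int) (q : Nat) (hq : q < e.length) :
    (e.map (fun v => (v, true))).getD q ((0 : Int), false) = (e.getD q 0, true) := by
  rw [List.getD, List.getElem?_map, List.getD, List.getElem?_eq_getElem hq]
  rfl

lemma foldl_some (es : List (List Int)) (a : List (Int × Bool)) :
    es.foldl (fun acc ids =>
      match acc with
      | none => some (ids.map (fun v => (v, true)))
      | some a => some (pvMergeB a ids)) (some a)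
    = some (es.foldl pvMergeB a) := by
  induction es generalizing a with
  | nil => rfl
  | cons e es ih => simp only [List.foldl_cons]; exact ih _

-- set(col) has at most one element iff every later value equals the first
lemma foldl_add_all_eq (x : Int) (xs : List Int) (s : List Int) (hs : x ∈ s)
    (h : ∀ y ∈ xs, y = x) : xs.foldl PySem.Set.add s = s := by
  induction xs generalizing s with
  | nil => rfl
  | cons y ys ih =>
    have hyx : y = x := h y (by simp)
    rw [List.foldl_cons, hyx, PySem.Set.add_of_mem hs]
    exact ih s hs (fun z hz => h z (by simp [hz]))

lemma ofList_all_eq (x : Int) (xs : List Int) (h : ∀ y ∈ xs, y = x) :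
    PySem.Set.ofList (x :: xs) = [x] := by
  rw [PySem.Set.ofList_eq_foldl, List.foldl_cons]
  have hadd : PySem.Set.add [] x = [x] := rfl
  rw [hadd]
  exact foldl_add_all_eq x xs [x] (by simp) h

lemma set_card_le_one (x : Int) (xs : List Int) :
    (PySem.Set.ofList (x :: xs)).length ≤ 1 ↔ ∀ y ∈ xs, y = x := by
  constructor
  · intro h y hy
    have hx : x ∈ PySem.Set.ofList (x :: xs) := by
      rw [PySem.Set.mem_ofList]; simp
    have hy' : y ∈ PySem.Set.ofList (x :: xs) := by
      rw [PySem.Set.mem_ofList]; simp [hy]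
    match hs : PySem.Set.ofList (x :: xs) with
    | [] => rw [hs] at hx; cases hx
    | [z] =>
      rw [hs] at hx hy'
      simp only [List.mem_singleton] at hx hy'
      rw [hy', ← hx]
    | z :: w :: t => rw [hs] at h; simp at h
  · intro h
    rw [ofList_all_eq x xs h]
    simp

-- A's negative index -(j+1) hits the element at absolute position len-(j+1)
lemma col_elem (e : List Int) (j : Nat) (hj : j + 1 ≤ e.length) :
    PySem.List.pyGetD e (-((j : Int) + 1)) 0 = e.getD (e.length - (j + 1)) 0 := by
  have h1 : -((j : Int) + 1) = -(((j + 1 : Nat)) : Int) := by push_cast; ring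
  rw [h1, PySem.List.pyGetD_neg_natCast e (j + 1) 0 (by omega) hj]
  rw [List.getD, List.getElem?_eq_getElem (by omega)]
  rfl

-- reused arithmetic shells for A's loop
lemma countP_range_eq_sum (r : Nat → Bool) (n : Nat) :
    ((List.range n).countP r : Int) = ∑ j ∈ Finset.range n, (if r j then (1 : Int) else 0) := by
  induction n with
  | zero => simp
  | succ n ih =>
    rw [List.range_succ, List.countP_append, Finset.sum_range_succ, ← ih]
    push_cast [List.countP_cons, List.countP_nil]
    split_ifs <;> ring

lemma countP_map_range_eq_sum (r : Int → Bool) (n : Nat) :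
    (((List.range n).map (fun k : Nat => (k : Int))).countP r : Int)
      = ∑ j ∈ Finset.range n, (if r ((j : Nat) : Int) then (1 : Int) else 0) := by
  induction n with
  | zero => simp
  | succ n ih =>
    rw [List.range_succ, List.map_append, List.countP_append, Finset.sum_range_succ, ← ih]
    by_cases h : r ((n : Nat) : Int)
    · simp [h]
    · simp [h]

lemma foldl_sub_count (P : Int → Prop) [DecidablePred P] (l : List Int) (init : Int) :
    l.foldl (fun s x => if P x then s - 1 else s) init
      = init - ((l.countP fun x => decide (P x)) : Int) := by
  induction l generalizing init with
  | nil => simp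
  | cons a l ih =>
    simp only [List.foldl_cons, List.countP_cons, ih]
    by_cases h : P a
    · simp [h]; ring
    · simp [h]

-- the heart: A's column loop equals the count of agreeing trailing positions
lemma main_core (e0 : List Int) (es : List (List Int)) (n : Nat)
    (hlen0 : n ≤ e0.length) (hlen : ∀ e ∈ es, n ≤ e.length) :
    (((List.range n).map (fun k : Nat => (k : Int))).reverse).foldl
      (fun snip_point x =>
        if ¬ ((PySem.Set.ofList ((e0 :: es).map
            (fun el => PySem.List.pyGetD el (-(x + 1)) 0))).length ≤ 1)
        then snip_point - 1 else snip_point) (n : Int)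
    = (((List.range n).countP (fun p =>
        es.all (fun e => e0.getD (e0.length - n + p) 0 == e.getD (e.length - n + p) 0)) : Nat) : Int) := by
  rw [foldl_sub_count (fun x => ¬ ((PySem.Set.ofList ((e0 :: es).map
        (fun el => PySem.List.pyGetD el (-(x + 1)) 0))).length ≤ 1)),
    List.countP_reverse, countP_map_range_eq_sum, countP_range_eq_sum,
    ← Finset.sum_range_reflect]
  have hterm : ∀ j ∈ Finset.range n,
      (if decide (¬ ((PySem.Set.ofList ((e0 :: es).map
            (fun el => PySem.List.pyGetD el (-((((n - 1 - j : Nat)) : Int) + 1)) 0))).length ≤ 1))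
          then (1 : Int) else 0)
        = 1 - (if es.all (fun e =>
            e0.getD (e0.length - n + j) 0 == e.getD (e.length - n + j) 0)
          then (1 : Int) else 0) := by
    intro j hj
    have hj' : j < n := Finset.mem_range.mp hj
    have hcol : ∀ e : List Int, n ≤ e.length →
        PySem.List.pyGetD e (-((((n - 1 - j : Nat)) : Int) + 1)) 0 = e.getD (e.length - n + j) 0 := by
      intro e he
      have h0 : (-((((n - 1 - j : Nat)) : Int) + 1)) = -((((n - 1 - j : Nat)) : Int) + 1) := by ring
      rw [h0, col_elem e (n - 1 - j) (by omega)]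
      congr 1
      omega
    have hmap : (e0 :: es).map (fun el => PySem.List.pyGetD el (-((((n - 1 - j : Nat)) : Int) + 1)) 0)
        = e0.getD (e0.length - n + j) 0
          :: es.map (fun e => e.getD (e.length - n + j) 0) := by
      simp only [List.map_cons]
      rw [hcol e0 hlen0]
      congr 1
      exact List.map_congr_left (fun e he => hcol e (hlen e he))
    rw [hmap]
    by_cases hag : ∀ y ∈ es.map (fun e => e.getD (e.length - n + j) 0),
        y = e0.getD (e0.length - n + j) 0
    · have h1 := (set_card_le_one _ _).mpr hag
      have h2 : es.all (fun e =>
          e0.getD (e0.length - n + j) 0 == e.getD (e.length - n + j) 0) = true := by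
        rw [List.all_eq_true]
        intro e he
        have := hag _ (List.mem_map_of_mem he)
        simp only [beq_iff_eq]
        exact this.symm
      rw [if_neg (by simp only [decide_eq_true_eq, not_not]; exact h1), if_pos h2]
      norm_num
    · have h1 : ¬ ((PySem.Set.ofList (e0.getD (e0.length - n + j) 0
            :: es.map (fun e => e.getD (e.length - n + j) 0))).length ≤ 1) := by
        intro hle
        exact hag ((set_card_le_one _ _).mp hle)
      have h2 : es.all (fun e =>
          e0.getD (e0.length - n + j) 0 == e.getD (e.length - n + j) 0) = false := by
        rw [List.all_eq_false]
        push Not at hag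
        obtain ⟨y, hy, hne⟩ := hag
        obtain ⟨e, he, rfl⟩ := List.mem_map.mp hy
        exact ⟨e, he, by simp only [beq_iff_eq]; exact fun h => hne h.symm⟩
      rw [if_pos (by simp only [decide_eq_true_eq]; exact h1),
        if_neg (by simp only [h2]; exact Bool.false_ne_true)]
      norm_num
  rw [Finset.sum_congr rfl hterm, Finset.sum_sub_distrib, Finset.sum_const,
    Finset.card_range, nsmul_eq_mul, mul_one]
  ring

-- ===== VERDICT (by name: the statement is the Claim_ definition above) =====
theorem same_ending_length_spec : Claim_equal_same_ending_length := by
  intro node _ hpre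
  unfold Spec_same_ending_length
  have hnode : node ≠ [] := hpre.1
  obtain ⟨e0, es, hE⟩ : ∃ e0 es, pvEndings node = e0 :: es := by
    cases h : pvEndings node with
    | nil =>
      exfalso
      apply hnode
      unfold pvEndings at h
      simpa using h
    | cons e0 es => exact ⟨e0, es, rfl⟩
  have hmapne : (pvEndings node).map (fun x => (x.length : Int)) ≠ [] := by
    simp [hE]
  obtain ⟨s, hs⟩ : ∃ s, PySem.List.min? ((pvEndings node).map (fun x => (x.length : Int)))
      (fun v => v) = some s := by
    cases h : PySem.List.min? ((pvEndings node).map (fun x => (x.length : Int))) (fun v => v) with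
    | none => exact absurd ((PySem.List.min?_eq_none_iff _ _).mp h) hmapne
    | some s => exact ⟨s, rfl⟩
  obtain ⟨em, hem, hse⟩ : ∃ e ∈ pvEndings node, s = (e.length : Int) := by
    have := PySem.List.min?_mem hs
    simp only [List.mem_map] at this
    obtain ⟨e, he, hsE⟩ := this
    exact ⟨e, he, hsE.symm⟩
  have hs0 : 0 ≤ s := by omega
  obtain ⟨n, rfl⟩ : ∃ n : Nat, s = (n : Int) := ⟨s.toNat, (Int.toNat_of_nonneg hs0).symm⟩
  have hisMin : ∀ e ∈ pvEndings node, n ≤ e.length := by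
    intro e he
    have := PySem.List.min?_isMin hs ((e.length : Int)) (List.mem_map_of_mem he)
    simp only at this
    omega
  -- n is exactly B's running minimum
  have hminfold : pvMinFold e0.length es = n := by
    apply Nat.le_antisymm
    · rcases List.mem_cons.mp (hE ▸ hem) with rfl | hm
      · calc pvMinFold em.length es ≤ em.length := minFold_le_init _ _
          _ = n := by omega
      · calc pvMinFold e0.length es ≤ em.length := minFold_le_mem _ _ _ hm
          _ = n := by omega
    · exact le_minFold _ _ _ (hisMin e0 (hE ▸ List.mem_cons_self ..))
        (fun e he => hisMin e (hE ▸ List.mem_cons_of_mem _ he))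
  have hlen0 : n ≤ e0.length := hisMin e0 (hE ▸ List.mem_cons_self ..)
  have hlen : ∀ e ∈ es, n ≤ e.length :=
    fun e he => hisMin e (hE ▸ List.mem_cons_of_mem _ he)
  -- rewrite B to the counted range form
  have hB : same_ending_length_alt node
      = (((List.range n).countP (fun p =>
          es.all (fun e => e0.getD (e0.length - n + p) 0
            == e.getD (e.length - n + p) 0)) : Nat) : Int) := by
    unfold same_ending_length_alt
    rw [hE]
    simp only [List.foldl_cons]
    rw [foldl_some]
    show (((es.foldl pvMergeB (e0.map (fun v => (v, true)))).countP (fun p => p.2) : Nat) : Int) = _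
    rw [foldl_merge_spec]
    simp only [List.length_map]
    rw [hminfold, List.countP_map]
    congr 1
    apply List.countP_congr
    intro p hp
    have hpn : p < n := List.mem_range.mp hp
    have hq : e0.length - n + p < e0.length := by omega
    simp only [Function.comp, getD_map_true e0 _ hq, Bool.true_and]
  rw [hB]
  -- rewrite A to the loop over the natCast range and close with main_core
  unfold same_ending_length
  simp only [pvShortest, hs, Option.getD_some]
  rw [hE, PySem.List.pyRange_zero_natCast]
  exact main_core e0 es n hlen0 hlen
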